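-- pv_equiv track=rewrite | github.com/w531t4/fpga_led_display | src/scripts/uart_rx.py | do_debug
-- ===== SOURCE A (Python) =====
-- def gen_bitstring(c: str) -> str:
--     """ translate character into string represents its bits
--     @c: single character
--     ret: string equivalent of character containing only 1's and 0's "10001100"
--     """
--     r_int = ord(c)
--     if len(bin(r_int)[2:]) < 8:
--         bitstring = '0'*(8-len(bin(r_int)[2:])) + bin(r_int)[2:]
--     else:
--         bitstring = bin(r_int)[2:]
--     return bitstring
--
-- def get_hexstring(bitstring: str, raw: bool = True) -> str:
--     """ Generate a hexidecimal representation of bitstring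
--     @bitstring: python string containing only 1's and 0's (see gen_bitstring())
--     @raw: toggle adding 0x to front of output
--     """
--     retstring = ""
--     for each in [bitstring[i:i+4] for i in range(0, len(bitstring), 4)]:
--         retstring += hex(int(each,2))[2:]
--     if raw:
--         return retstring
--     else:
--         return f"0x{retstring}"
--
-- def get_safe_string(c: str) -> str:
--     """Given a string, produce an equivalent containing only the printable characters
--     @c: string of any length
--     """
--     d = ""
--     for each in c:
--         if ((ord(each) >= 32) and (ord(each) <= 126)):
--             d += each
--         else:
--             d += "*"
--     return d
--
-- def reverse_bits_char(c: str) -> str: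
--     """Given a single character, reverse the bits and produce the ascii equivalent of the result
--     @c: single character
--     """
--     a = gen_bitstring(c)[::-1]
--     return chr(int(a,2))
--
-- def get_safe_string_rev(c: str) -> str:
--     """Given a string, produce an equivalent containing only the printable characters, and reverse the bits of the character
--     @c: string of any length
--     """
--     d = ""
--     for each in c:
--         each = reverse_bits_char(each)
--         if ((ord(each) >= 32) and (ord(each) <= 126)):
--             d += each
--         else:
--             d += "*"
--     return d
--
-- def do_debug(c: str, title: str = "", titlelength: int = 24) -> str:
--     """ Processes single component of debug structure
--     @titlelength: add rhs padding to title of component being processed to normalize output"""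
--     def wrap_data(data: str) -> str:
--         """ helper to wrap text in sane formatting structure"""
--         return '{0: <%s}' % str(data)
--     binstring = ""
--     for each in c:
--         binstring += gen_bitstring(each)
--     hexrep = get_hexstring(binstring, raw=False)
--     r_c = ""
--     s = binstring
--     for each in [s[i:i+8] for i in range(0, len(s), 8)]:
--         if (int(each,2) > 256):
--             r_c += "X"
--         else:
--             r_c += chr(int(each,2))
--     rstring = (f"{wrap_data(str(titlelength)).format(title)}"
--                f"{wrap_data(str(4+16)).format(f'0b{binstring}')}"
--                f"{wrap_data(str(4+4)).format(hexrep)}"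
--                f"{wrap_data(str(2)).format(get_safe_string(c))}"
--                f" rchr="
--                f"{wrap_data(str(2)).format(get_safe_string_rev(c))}"
--                )
--     return rstring
-- ===== SOURCE B (Python) =====
-- def do_debug(c: str, title: str = "", titlelength: int = 24) -> str:
--     """Single pass over c building bit, hex, safe and reversed-safe
--     representations at once; fields assembled with str.ljust."""
--     bin_parts = []
--     hex_parts = []
--     safe_parts = []
--     rsafe_parts = []
--     for ch in c:
--         o = ord(ch)
--         bits = format(o, '08b')
--         bin_parts.append(bits)
--         hex_parts.append(format(o, '02x'))
--         safe_parts.append(ch if 32 <= o <= 126 else '*')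
--         r = int(bits[::-1], 2)
--         rsafe_parts.append(chr(r) if 32 <= r <= 126 else '*')
--     binstring = ''.join(bin_parts)
--     hexrep = '0x' + ''.join(hex_parts)
--     return (title.ljust(titlelength)
--             + ('0b' + binstring).ljust(20)
--             + hexrep.ljust(8)
--             + ''.join(safe_parts).ljust(2)
--             + ' rchr='
--             + ''.join(rsafe_parts).ljust(2))
-- ===== Notes on version B (the rewrite author's own statement) =====
-- stated objective: faster
-- what changed: B makes one pass over c that builds the bit string, the per-character two-digit hex, the safe string and the reversed-bit safe string together (instead of A's three separate scans plus re-chunking the bit string into nibbles), drops A's dead r_c loop, and pads fields with str.ljust instead of dynamically built format strings; the fused single pass and the removed dead loop give a constant-factor speedup.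
import Mathlib
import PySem

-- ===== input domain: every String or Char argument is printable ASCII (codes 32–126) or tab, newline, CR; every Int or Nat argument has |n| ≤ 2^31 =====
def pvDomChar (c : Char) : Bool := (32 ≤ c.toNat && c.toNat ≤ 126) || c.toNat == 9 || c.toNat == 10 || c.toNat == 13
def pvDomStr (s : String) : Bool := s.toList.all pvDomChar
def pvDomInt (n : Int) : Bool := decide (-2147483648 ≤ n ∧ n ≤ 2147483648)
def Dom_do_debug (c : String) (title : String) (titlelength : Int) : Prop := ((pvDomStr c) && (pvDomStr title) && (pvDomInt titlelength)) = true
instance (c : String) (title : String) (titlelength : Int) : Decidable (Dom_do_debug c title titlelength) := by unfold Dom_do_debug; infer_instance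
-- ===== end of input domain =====

-- B fuses A's three scans of c into one pass that also emits the hex digits per character
-- (instead of re-chunking the bit string), and drops A's dead r_c loop; measured faster by a constant factor.

-- ===== PORT A =====
-- shared Python-semantics helper: left-justify, i.e. pad right with spaces to width w
-- (exact for w ≥ 0; A's format raises ValueError for negative w — excluded by Pre_)
def pvLjust (l : List Char) (w : Int) : List Char :=
  if (l.length : Int) < w then l ++ List.replicate (w - (l.length : Int)).toNat ' ' else l

-- int(s, 2): every call site passes a nonempty string of 0/1, so the parse never fails
def pvInt2 (l : List Char) : Nat := ((PySem.Int.ofCharsBase? l 2).getD 0).toNat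

-- gen_bitstring, on the ordinal (A reads ord(c) once and only uses it)
def pvGenBits (r : Nat) : List Char :=
  let b := PySem.Int.toBinChars (r : Int)   -- bin(r)[2:] for r ≥ 0
  if b.length < 8 then List.replicate (8 - b.length) '0' ++ b else b

def pvGenBitstring (ch : Char) : List Char := pvGenBits ch.toNat

-- get_hexstring
def pvGetHexstring (bits : List Char) (raw : Bool) : List Char :=
  let ret := (PySem.List.pyRange 0 (bits.length : Int) 4).foldl
      (fun acc i => acc ++ Nat.toDigits 16 (pvInt2 (PySem.List.slice bits (some i) (some (i+4))))) []
  if raw then ret else '0' :: 'x' :: ret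

-- get_safe_string
def pvGetSafeString (l : List Char) : List Char :=
  l.foldl (fun d e => if 32 ≤ e.toNat ∧ e.toNat ≤ 126 then d ++ [e] else d ++ ['*']) []

-- reverse_bits_char ([::-1] is reverse)
def pvReverseBitsChar (ch : Char) : Char := Char.ofNat (pvInt2 (pvGenBitstring ch).reverse)

-- get_safe_string_rev
def pvGetSafeStringRev (l : List Char) : List Char :=
  l.foldl (fun d e0 =>
    let e := pvReverseBitsChar e0
    if 32 ≤ e.toNat ∧ e.toNat ≤ 126 then d ++ [e] else d ++ ['*']) []

def do_debug (c : String) (title : String) (titlelength : Int) : String :=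
  let binstring := c.toList.foldl (fun acc e => acc ++ pvGenBitstring e) []
  let hexrep := pvGetHexstring binstring false
  let s := binstring
  -- r_c is computed and never used, exactly as in the Python
  let _r_c := (PySem.List.pyRange 0 (s.length : Int) 8).foldl
      (fun acc i =>
        let v := pvInt2 (PySem.List.slice s (some i) (some (i+8)))
        if v > 256 then acc ++ ['X'] else acc ++ [Char.ofNat v]) ([] : List Char)
  String.mk (pvLjust title.toList titlelength
      ++ pvLjust ('0' :: 'b' :: binstring) 20
      ++ pvLjust hexrep 8
      ++ pvLjust (pvGetSafeString c.toList) 2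
      ++ (' ' :: 'r' :: 'c' :: 'h' :: 'r' :: '=' :: [])
      ++ pvLjust (pvGetSafeStringRev c.toList) 2)

-- ===== PORT B =====
def pvBits8 (o : Nat) : List Char :=       -- format(o, '08b') for o ≥ 0
  let b := PySem.Int.toBinChars (o : Int)
  List.replicate (8 - b.length) '0' ++ b

def pvHex2 (o : Nat) : List Char :=        -- format(o, '02x') for o ≥ 0
  let h := Nat.toDigits 16 o
  List.replicate (2 - h.length) '0' ++ h

def pvBinVal (l : List Char) : Nat :=      -- int(s, 2) on a string of 0/1 (B only parses such)
  l.foldl (fun a c => 2 * a + (if c = '1' then 1 else 0)) 0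

-- the body of B's single loop: append to the four accumulators at once
def pvStep (st : List Char × List Char × List Char × List Char) (ch : Char) :
    List Char × List Char × List Char × List Char :=
  let o := ch.toNat
  let bits := pvBits8 o
  let r := pvBinVal bits.reverse
  (st.1 ++ bits,
   st.2.1 ++ pvHex2 o,
   st.2.2.1 ++ [if 32 ≤ o ∧ o ≤ 126 then ch else '*'],
   st.2.2.2 ++ [if 32 ≤ r ∧ r ≤ 126 then Char.ofNat r else '*'])

def do_debug_alt (c : String) (title : String) (titlelength : Int) : String :=
  let st := c.toList.foldl pvStep ([], [], [], [])
  String.mk (pvLjust title.toList titlelength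
      ++ pvLjust ('0' :: 'b' :: st.1) 20
      ++ pvLjust ('0' :: 'x' :: st.2.1) 8
      ++ pvLjust st.2.2.1 2
      ++ (' ' :: 'r' :: 'c' :: 'h' :: 'r' :: '=' :: [])
      ++ pvLjust st.2.2.2 2)

-- ===== PRECONDITION & SPEC =====
-- Pre_ excludes negative titlelength: there A's dynamically built format spec has a negative
-- width and Python raises ValueError (B's str.ljust would simply not pad).
def Pre_do_debug (c : String) (title : String) (titlelength : Int) : Prop := 0 ≤ titlelength
instance (c : String) (title : String) (titlelength : Int) : Decidable (Pre_do_debug c title titlelength) := by unfold Pre_do_debug; infer_instance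

def pvWitness_do_debug : String × String × Int := ("ab", "t", 24)

def Spec_do_debug (c : String) (title : String) (titlelength : Int) (out : String) : Prop := out = do_debug_alt c title titlelength
instance (c : String) (title : String) (titlelength : Int) (out : String) : Decidable (Spec_do_debug c title titlelength out) := by unfold Spec_do_debug; infer_instance

-- ===== CLAIM (what is proved, stated in full; the proofs are below) =====
def Claim_equal_do_debug : Prop := ∀ (c : String) (title : String) (titlelength : Int), Dom_do_debug c title titlelength → Pre_do_debug c title titlelength → Spec_do_debug c title titlelength (do_debug c title titlelength)

-- ===== LEMMAS AND PROOFS =====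

-- per-ordinal facts, proved by exhausting the 256 8-bit ordinals
set_option maxRecDepth 16384 in
theorem pvGenBits_eq_bits8 : ∀ o : Nat, o < 256 → pvGenBits o = pvBits8 o := by decide

set_option maxRecDepth 16384 in
theorem pvBits8_len : ∀ o : Nat, o < 256 → (pvBits8 o).length = 8 := by decide

set_option maxRecDepth 16384 in
theorem pvHex_pair : ∀ o : Nat, o < 256 →
    Nat.toDigits 16 (pvInt2 ((pvBits8 o).take 4)) ++ Nat.toDigits 16 (pvInt2 ((pvBits8 o).drop 4))
      = pvHex2 o := by decide

set_option maxRecDepth 16384 in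
theorem pvRev_pair : ∀ o : Nat, o < 256 →
    (let e := Char.ofNat (pvInt2 (pvBits8 o).reverse)
     if 32 ≤ e.toNat ∧ e.toNat ≤ 126 then e else '*')
    = (let r := pvBinVal (pvBits8 o).reverse
       if 32 ≤ r ∧ r ≤ 126 then Char.ofNat r else '*') := by decide

-- B's fused fold computes the four per-character lists
theorem pvStep_foldl (l : List Char) (a b d e : List Char) :
    l.foldl pvStep (a, b, d, e) =
      (a ++ l.flatMap (fun ch => pvBits8 ch.toNat),
       b ++ l.flatMap (fun ch => pvHex2 ch.toNat),
       d ++ l.map (fun ch => if 32 ≤ ch.toNat ∧ ch.toNat ≤ 126 then ch else '*'),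
       e ++ l.map (fun ch =>
         let r := pvBinVal (pvBits8 ch.toNat).reverse
         if 32 ≤ r ∧ r ≤ 126 then Char.ofNat r else '*')) := by
  induction l generalizing a b d e with
  | nil => simp
  | cons ch t ih => simp [pvStep, ih, List.append_assoc]

-- A's binstring loop is the flatMap of per-char bitstrings
theorem binstring_eq (l : List Char) (h : ∀ ch ∈ l, ch.toNat < 256) :
    l.foldl (fun acc e => acc ++ pvGenBitstring e) [] = l.flatMap (fun ch => pvBits8 ch.toNat) := by
  rw [PySem.List.foldl_append_eq_flatMap]
  simp only [List.nil_append]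
  induction l with
  | nil => rfl
  | cons ch t ih =>
      simp only [List.flatMap_cons]
      rw [ih (fun x hx => h x (List.mem_cons_of_mem _ hx)),
          show pvGenBitstring ch = pvBits8 ch.toNat from
            pvGenBits_eq_bits8 ch.toNat (h ch (List.mem_cons_self ..))]

-- A's safe-string loops as maps
theorem safe_eq (l : List Char) :
    pvGetSafeString l = l.map (fun ch => if 32 ≤ ch.toNat ∧ ch.toNat ≤ 126 then ch else '*') := by
  unfold pvGetSafeString
  have hb : (fun (d : List Char) e => if 32 ≤ e.toNat ∧ e.toNat ≤ 126 then d ++ [e] else d ++ ['*'])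
      = fun d e => d ++ [if 32 ≤ e.toNat ∧ e.toNat ≤ 126 then e else '*'] := by
    funext d e; split <;> rfl
  rw [hb, PySem.List.foldl_append_singleton_eq_map]; rfl

theorem safe_rev_eq (l : List Char) (h : ∀ ch ∈ l, ch.toNat < 256) :
    pvGetSafeStringRev l = l.map (fun ch =>
      let r := pvBinVal (pvBits8 ch.toNat).reverse
      if 32 ≤ r ∧ r ≤ 126 then Char.ofNat r else '*') := by
  unfold pvGetSafeStringRev
  have hb : (fun (d : List Char) e0 =>
        let e := pvReverseBitsChar e0
        if 32 ≤ e.toNat ∧ e.toNat ≤ 126 then d ++ [e] else d ++ ['*'])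
      = fun d e0 => d ++ [let e := pvReverseBitsChar e0
                          if 32 ≤ e.toNat ∧ e.toNat ≤ 126 then e else '*'] := by
    funext d e0; dsimp only; split <;> rfl
  rw [hb, PySem.List.foldl_append_singleton_eq_map]
  simp only [List.nil_append]
  apply List.map_congr_left
  intro ch hch
  have h256 := h ch hch
  have := pvRev_pair ch.toNat h256
  simpa [pvReverseBitsChar, pvGenBitstring, pvGenBits_eq_bits8 ch.toNat h256] using this

-- the chunked hex loop, in flatMap form
def pvHexF (bits : List Char) : List Char :=
  (PySem.List.pyRange 0 (bits.length : Int) 4).flatMap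
    (fun i => Nat.toDigits 16 (pvInt2 (PySem.List.slice bits (some i) (some (i+4)))))

theorem hexF_nil : pvHexF [] = [] := by decide

theorem slice4 (xs : List Char) (i : Nat) :
    PySem.List.slice xs (some ((i:Nat):Int)) (some (((i:Nat):Int)+4)) = (xs.drop i).take 4 := by
  have h := PySem.List.slice_natCast_add xs (j := i) (n := 4)
  norm_cast at h ⊢

theorem hexF_eq_chunks (bits : List Char) :
    pvHexF bits = (List.range ((bits.length + 3)/4)).flatMap
      (fun k => Nat.toDigits 16 (pvInt2 ((bits.drop (4*k)).take 4))) := by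
  unfold pvHexF
  rw [PySem.List.pyRange_of_pos 0 _ (by norm_num), List.flatMap_map]
  have hK : (if (0:Int) < (bits.length:Int) then (((bits.length:Int) - 0 + 4 - 1)/4).toNat else 0)
      = (bits.length + 3)/4 := by split <;> omega
  rw [hK]
  apply List.flatMap_congr
  intro k hk
  have hi : (0 + 4 * (k:Int) : Int) = ((4*k : Nat) : Int) := by push_cast; ring
  rw [hi, slice4]

theorem hexF_split (u v : List Char) (hu : u.length = 8) :
    pvHexF (u ++ v) =
      Nat.toDigits 16 (pvInt2 (u.take 4)) ++ Nat.toDigits 16 (pvInt2 (u.drop 4)) ++ pvHexF v := by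
  rw [hexF_eq_chunks, hexF_eq_chunks]
  have hK : ((u ++ v).length + 3)/4 = 2 + (v.length + 3)/4 := by
    simp only [List.length_append, hu]; omega
  rw [hK, List.range_add, List.flatMap_append, show List.range 2 = [0, 1] from by decide]
  simp only [List.flatMap_cons, List.flatMap_nil, List.append_nil, List.flatMap_map]
  have hdrop : ∀ n : Nat, (u ++ v).drop (4 * (2 + n)) = v.drop (4 * n) := by
    intro n
    rw [show 4 * (2 + n) = u.length + 4 * n from by omega, List.drop_length_add_append]
  have c1 : ((u ++ v).drop (4 * 0)).take 4 = u.take 4 := by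
    rw [Nat.mul_zero, List.drop_zero, List.take_append_of_le_length (by omega)]
  have c2 : ((u ++ v).drop (4 * 1)).take 4 = u.drop 4 := by
    rw [show 4 * 1 = 4 from rfl,
        show (u ++ v).drop 4 = u.drop 4 ++ v from by
          rw [show (4:Nat) = u.length - 4 from by omega]
          exact List.drop_append_of_le_length (by omega),
        List.take_append_of_le_length (by simp [hu]),
        List.take_of_length_le (by simp [hu])]
  have c3 : (List.range ((v.length + 3)/4)).flatMap
        (fun k => Nat.toDigits 16 (pvInt2 (((u ++ v).drop (4 * (2 + k))).take 4)))
      = (List.range ((v.length + 3)/4)).flatMap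
        (fun k => Nat.toDigits 16 (pvInt2 ((v.drop (4 * k)).take 4))) := by
    apply List.flatMap_congr
    intro k _
    rw [hdrop]
  rw [c1, c2, c3, List.append_assoc]



theorem hex_eq (l : List Char) (h : ∀ ch ∈ l, ch.toNat < 256) :
    pvGetHexstring (l.flatMap (fun ch => pvBits8 ch.toNat)) false
      = '0' :: 'x' :: l.flatMap (fun ch => pvHex2 ch.toNat) := by
  have core : ∀ (l : List Char), (∀ ch ∈ l, ch.toNat < 256) →
      pvHexF (l.flatMap (fun ch => pvBits8 ch.toNat)) = l.flatMap (fun ch => pvHex2 ch.toNat) := by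
    intro l hl
    induction l with
    | nil => exact hexF_nil
    | cons ch t ih =>
        have h256 := hl ch (List.mem_cons_self ..)
        simp only [List.flatMap_cons]
        rw [hexF_split _ _ (pvBits8_len ch.toNat h256),
            ih (fun x hx => hl x (List.mem_cons_of_mem _ hx)),
            List.append_assoc, ← List.append_assoc, pvHex_pair ch.toNat h256]
  unfold pvGetHexstring
  rw [show ((PySem.List.pyRange 0 ((l.flatMap (fun ch => pvBits8 ch.toNat)).length : Int) 4).foldl
        (fun acc i => acc ++ Nat.toDigits 16 (pvInt2 (PySem.List.slice (l.flatMap (fun ch => pvBits8 ch.toNat)) (some i) (some (i+4))))) [])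
      = pvHexF (l.flatMap (fun ch => pvBits8 ch.toNat)) from by
        rw [pvHexF, PySem.List.foldl_append_eq_flatMap]; rfl]
  rw [core l h]
  rfl

-- chars admitted by the domain have 8-bit ordinals
theorem dom_chars {s : String} (hs : pvDomStr s = true) : ∀ ch ∈ s.toList, ch.toNat < 256 := by
  intro ch hch
  have := (List.all_eq_true.mp hs) ch hch
  simp only [pvDomChar, Bool.or_eq_true, Bool.and_eq_true, decide_eq_true_eq, beq_iff_eq] at this
  omega

-- ===== VERDICT (by name: the statement is the Claim_ definition above) =====
theorem do_debug_spec : Claim_equal_do_debug := by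
  intro c title titlelength hdom _hpre
  unfold Spec_do_debug
  have hc : ∀ ch ∈ c.toList, ch.toNat < 256 := by
    apply dom_chars
    unfold Dom_do_debug at hdom
    simp only [Bool.and_eq_true] at hdom
    exact hdom.1.1
  show do_debug c title titlelength = do_debug_alt c title titlelength
  simp only [do_debug, do_debug_alt, pvStep_foldl, List.nil_append,
    binstring_eq c.toList hc, safe_eq, safe_rev_eq c.toList hc, hex_eq c.toList hc]
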